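-- pv_equiv track=rewrite | github.com/cddlsjy/files2AI | 2026-deespseek-file2AI.py | get_tree_structure
-- ===== SOURCE A (Python) =====
-- def get_tree_structure(file_list):
--     """从文件列表生成目录树"""
--     if not file_list:
--         return "(empty)"
--     tree = {}
--     for path in file_list:
--         parts = path.split('/')
--         node = tree
--         for part in parts:
--             node = node.setdefault(part, {})
--     lines = []
--     def walk(node, indent=''):
--         items = sorted(node.items())
--         for i, (name, child) in enumerate(items):
--             is_last = (i == len(items)-1)
--             prefix = '└── ' if is_last else '├── '
--             lines.append(f"{indent}{prefix}{name}")
--             if child: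
--                 walk(child, indent + ('    ' if is_last else '│   '))
--     walk(tree)
--     return '\n'.join(lines)
-- ===== SOURCE B (Python) =====
-- def get_tree_structure(file_list):
--     """从文件列表生成目录树"""
--     if not file_list:
--         return "(empty)"
--     paths = sorted(set(tuple(p.split('/')) for p in file_list))
--
--     def render(paths, indent):
--         # paths: lexicographically sorted, distinct, nonempty component tuples
--         lines = []
--         n = len(paths)
--         i = 0
--         while i < n:
--             head = paths[i][0]
--             j = i
--             while j < n and paths[j][0] == head:
--                 j += 1
--             last = (j == n)
--             lines.append(indent + ('└── ' if last else '├── ') + head)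
--             children = [p[1:] for p in paths[i:j] if len(p) > 1]
--             lines.extend(render(children, indent + ('    ' if last else '│   ')))
--             i = j
--         return lines
--
--     return '\n'.join(render(paths, ''))
-- ===== Notes on version B (the rewrite author's own statement) =====
-- stated objective: alternative
-- what changed: A builds a nested-dict trie and renders it with a recursive walk sorting each level; B builds no trie at all: it dedups the split paths, sorts them once lexicographically as component tuples, and renders by recursive grouping on the first component.
import Mathlib
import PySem

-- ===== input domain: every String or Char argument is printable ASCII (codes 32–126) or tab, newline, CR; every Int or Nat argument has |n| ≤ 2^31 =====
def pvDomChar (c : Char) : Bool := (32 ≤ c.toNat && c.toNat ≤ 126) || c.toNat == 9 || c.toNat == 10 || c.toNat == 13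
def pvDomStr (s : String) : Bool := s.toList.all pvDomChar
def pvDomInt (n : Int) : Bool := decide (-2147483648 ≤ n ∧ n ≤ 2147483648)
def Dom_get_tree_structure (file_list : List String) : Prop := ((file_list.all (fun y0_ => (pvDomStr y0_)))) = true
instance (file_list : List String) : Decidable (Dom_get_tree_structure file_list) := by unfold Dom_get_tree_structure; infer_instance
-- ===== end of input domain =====

-- B replaces A's trie (nested dict) construction + per-level sorting walk by a trie-free
-- algorithm: dedup the split paths, sort them ONCE lexicographically, then render by
-- recursive grouping on the first component; objective: alternative algorithm, same output.

-- ===== PORT A =====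
-- The nested Python dict {name: subdict} is the mutual inductive Trie/TrieL: TrieL is the
-- insertion-ordered association list of (key, child) pairs (keys unique by construction,
-- exactly a Python dict built with setdefault).
mutual
inductive Trie : Type
  | node : TrieL → Trie
inductive TrieL : Type
  | nil : TrieL
  | cons : String → Trie → TrieL → TrieL
end

-- path.split('/') — PySem.Chars.splitOn is exact for a non-empty separator
def pySplitSlash (s : String) : List String :=
  (PySem.Chars.splitOn s.toList "/".toList).map (fun cs => String.ofList cs)

-- 'node = node.setdefault(part, {})' chained over parts, as a functional update of the trie
mutual
def insertParts : Trie → List String → Trie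
  | t, [] => t
  | .node l, p :: ps => .node (setdefaultGo l p ps)
def setdefaultGo : TrieL → String → List String → TrieL
  | .nil, p, ps => .cons p (insertParts (.node .nil) ps) .nil
  | .cons k t r, p, ps =>
      if k = p then .cons k (insertParts t ps) r else .cons k t (setdefaultGo r p ps)
end

-- the 'for path in file_list' construction loop
def buildTree (file_list : List String) : Trie :=
  file_list.foldl (fun t path => insertParts t (pySplitSlash path)) (.node .nil)

-- truthiness 'if child:' of the child dict
def Trie.isEmpty : Trie → Bool
  | .node .nil => true
  | .node (.cons _ _ _) => false

def TrieL.toItems : TrieL → List (String × Trie)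
  | .nil => []
  | .cons k t r => (k, t) :: TrieL.toItems r

-- sorted(node.items()): keys are unique, so Python's tuple sort equals sort by first component
def sortedItems (t : Trie) : List (String × Trie) :=
  match t with
  | .node l => PySem.List.sorted l.toItems (fun p => p.1) false

-- size measures for termination of A's recursive walk
mutual
def sizeT : Trie → Nat
  | .node l => sizeL l + 1
def sizeL : TrieL → Nat
  | .nil => 0
  | .cons _ t r => sizeT t + 1 + sizeL r
end

def msr (l : List (String × Trie)) : Nat := (l.map (fun p => sizeT p.2 + 1)).sum

theorem msr_cons (name : String) (child : Trie) (rest : List (String × Trie)) :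
    msr ((name, child) :: rest) = sizeT child + 1 + msr rest := by
  simp [msr]

theorem msr_toItems : ∀ (l : TrieL), msr l.toItems = sizeL l
  | .nil => rfl
  | .cons k t r => by
      rw [TrieL.toItems, msr_cons, msr_toItems r, sizeL]

theorem msr_sortedItems (t : Trie) : msr (sortedItems t) + 1 = sizeT t := by
  match t with
  | .node l =>
    have hp : (PySem.List.sorted l.toItems (fun p => p.1) false).Perm l.toItems :=
      PySem.List.sorted_perm _ _ _
    have h2 : msr (PySem.List.sorted l.toItems (fun p => p.1) false) = msr l.toItems :=
      (hp.map _).sum_eq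
    rw [sortedItems, h2, msr_toItems, sizeT]

-- the recursive walk: walkA = A's 'walk(node, indent)', goA = its enumerate loop over items
mutual
def walkA (t : Trie) (ind : String) (lines : List String) : List String :=
  let items := sortedItems t
  goA items 0 items.length ind lines
termination_by sizeT t
decreasing_by have := msr_sortedItems t; omega
def goA (items : List (String × Trie)) (i n : Nat) (ind : String) (lines : List String) :
    List String :=
  match items with
  | [] => lines
  | (name, child) :: rest =>
    let isLast := decide (i = n - 1)
    let lines := lines ++ [ind ++ (if isLast then "└── " else "├── ") ++ name]
    let lines := if child.isEmpty then lines
                 else walkA child (ind ++ (if isLast then "    " else "│   ")) lines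
    goA rest (i + 1) n ind lines
termination_by msr items
decreasing_by
  · rw [msr_cons]; omega
  · rw [msr_cons]; omega
end

def get_tree_structure (file_list : List String) : String :=
  if file_list = [] then "(empty)"
  else PySem.Str.join "\n" (walkA (buildTree file_list) "" [])

-- ===== PORT B =====
-- Source B: paths = sorted(set(tuple(p.split('/')) for p in file_list)); then render(paths, '')
-- groups the lex-sorted distinct paths by first component and recurses on the tails.

-- the list comprehension [p[1:] for p in group if len(p) > 1]
def childTails (l : List (List String)) : List (List String) :=
  l.filterMap (fun q => if 1 < q.length then some q.tail else none)

-- termination measure for the grouping recursion: total number of components plus list length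
def msum (l : List (List String)) : Nat := (l.map List.length).sum + l.length

theorem msum_le_of_sublist {l₁ l₂ : List (List String)} (h : l₁.Sublist l₂) :
    msum l₁ ≤ msum l₂ := by
  have h1 : (l₁.map List.length).sum ≤ (l₂.map List.length).sum :=
    (h.map List.length).sum_le_sum (by intro a _; exact Nat.zero_le a)
  have h2 : l₁.length ≤ l₂.length := h.length_le
  simp only [msum]; omega

theorem msum_children_le (l : List (List String)) :
    msum (childTails l) ≤ (l.map List.length).sum := by
  induction l with
  | nil => simp [msum, childTails]
  | cons q r ih =>
    simp only [childTails, List.filterMap_cons] at *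
    by_cases h : 1 < q.length
    · rw [if_pos h]
      simp only [msum, List.map_cons, List.sum_cons, List.length_cons] at *
      have : q.tail.length + 1 = q.length := by
        cases q with | nil => simp at h | cons a t => simp
      omega
    · rw [if_neg h]
      simp only [msum, List.map_cons, List.sum_cons] at *
      omega

-- render(paths, indent) of Source B: its outer while loop peels off the group sharing
-- paths[i][0] (the takeWhile/dropWhile split below) and becomes the structural recursion
-- on the rest; the lines of a group are its line, the recursively rendered nonempty
-- tails, then the remaining groups; paths[i][0] is headD "" (split paths are nonempty)
def renderB (paths : List (List String)) (ind : String) : List String :=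
  match paths with
  | [] => []
  | p :: rest =>
    let head := p.headD ""
    let grp := (p :: rest).takeWhile (fun q => q.headD "" == head)
    let rst := (p :: rest).dropWhile (fun q => q.headD "" == head)
    let isLast := rst.isEmpty
    let line := ind ++ (if isLast then "└── " else "├── ") ++ head
    let children := childTails grp
    line :: (renderB children (ind ++ (if isLast then "    " else "│   ")) ++ renderB rst ind)
termination_by msum paths
decreasing_by
  · have h1 := msum_children_le ((p :: rest).takeWhile (fun q => q.headD "" == p.headD ""))
    have h2 : msum ((p :: rest).takeWhile (fun q => q.headD "" == p.headD "")) ≤ msum (p :: rest) :=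
      msum_le_of_sublist (List.takeWhile_sublist _)
    have h3 : 1 ≤ ((p :: rest).takeWhile (fun q => q.headD "" == p.headD "")).length := by
      rw [List.takeWhile_cons_of_pos (by simp)]; simp
    simp only [msum] at *
    omega
  · have hp : (p :: rest).dropWhile (fun q => q.headD "" == p.headD "") = rest.dropWhile (fun q => q.headD "" == p.headD "") := by
      rw [List.dropWhile_cons_of_pos (by simp)]
    have h2 : msum (rest.dropWhile (fun q => q.headD "" == p.headD "")) ≤ msum rest :=
      msum_le_of_sublist (List.dropWhile_sublist _)
    rw [hp]
    simp only [msum] at *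
    simp only [List.map_cons, List.sum_cons, List.length_cons]
    omega

def get_tree_structure_alt (file_list : List String) : String :=
  if file_list = [] then "(empty)"
  else PySem.Str.join "\n"
    (renderB (PySem.List.sorted (PySem.Set.ofList (file_list.map pySplitSlash)) (fun x => x) false) "")

-- ===== PRECONDITION & SPEC =====
def Spec_get_tree_structure (file_list : List String) (out : String) : Prop := out = get_tree_structure_alt file_list
instance (file_list : List String) (out : String) : Decidable (Spec_get_tree_structure file_list out) := by unfold Spec_get_tree_structure; infer_instance

-- ===== CLAIM (what is proved, stated in full; the proofs are below) =====
def Claim_equal_get_tree_structure : Prop := ∀ (file_list : List String), Dom_get_tree_structure file_list → Spec_get_tree_structure file_list (get_tree_structure file_list)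

-- ===== LEMMAS AND PROOFS =====

-- proof-side abbreviations
def hd (q : List String) : String := q.headD ""

def heads (P : List (List String)) : List String := P.map hd

-- tails of the paths of P that start with component k (Python-dict child of key k)
def cp (P : List (List String)) (k : String) : List (List String) :=
  P.filterMap (fun q => match q with
    | [] => none
    | a :: t => if a = k then some t else none)

def trieOf (P : List (List String)) : Trie := P.foldl insertParts (.node .nil)

def SD (Q : List (List String)) : List (List String) :=
  PySem.List.sorted (PySem.Set.ofList Q) (fun x => x) false

def SK (H : List String) : List String :=
  PySem.List.sorted (PySem.Set.ofList H) (fun x => x) false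

def rootL : Trie → TrieL
  | .node l => l

def keysOf : TrieL → List String
  | .nil => []
  | .cons k _ r => k :: keysOf r

def findT : TrieL → String → Option Trie
  | .nil, _ => none
  | .cons k t r, q => if q = k then some t else findT r q

-- A's walk, rewritten without the index/accumulator: the shape the equivalence is proved on
def itemsRender (items : List (String × Trie)) (ind : String) : List String :=
  match items with
  | [] => []
  | (k, c) :: rest =>
    (ind ++ (if rest = [] then "└── " else "├── ") ++ k)
      :: ((if c.isEmpty then []
           else itemsRender (sortedItems c) (ind ++ (if rest = [] then "    " else "│   ")))
          ++ itemsRender rest ind)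
termination_by msr items
decreasing_by
  · have := msr_sortedItems c; rw [msr_cons]; omega
  · rw [msr_cons]; omega

-- splitOn never returns the empty list, so every split path is nonempty
theorem splitOn_go_ne_nil (sep : List Char) : ∀ (fuel : Nat) (l cur : List Char)
    (acc : List (List Char)), PySem.Chars.splitOn.go sep fuel l cur acc ≠ [] := by
  intro fuel
  induction fuel with
  | zero => intro l cur acc; simp [PySem.Chars.splitOn.go]
  | succ n ih =>
    intro l cur acc
    cases l with
    | nil => simp [PySem.Chars.splitOn.go]
    | cons c rest =>
      rw [PySem.Chars.splitOn.go]
      split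
      · exact ih _ _ _
      · exact ih _ _ _

theorem pySplitSlash_ne_nil (s : String) : pySplitSlash s ≠ [] := by
  simp only [pySplitSlash, ne_eq, List.map_eq_nil_iff]
  simpa [PySem.Chars.splitOn] using splitOn_go_ne_nil "/".toList (s.toList.length + 1) s.toList [] []

-- ---- goA with accumulator = itemsRender ----
theorem goA_eq_itemsRender (items : List (String × Trie)) (i : Nat) (ind : String)
    (lines : List String) :
    goA items i (i + items.length) ind lines = lines ++ itemsRender items ind := by
  match items with
  | [] => rw [goA, itemsRender]; simp
  | (name, child) :: rest =>
    rw [goA, itemsRender]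
    by_cases hr : rest = []
    · subst hr
      simp only [List.length_cons, List.length_nil, decide_eq_true_eq,
        eq_true (show i = i + (0 + 1) - 1 by omega), if_true]
      by_cases hc : child.isEmpty
      · rw [if_pos hc, if_pos hc]
        simp [goA, itemsRender]
      · rw [if_neg hc, if_neg hc, walkA]
        have hrec := goA_eq_itemsRender (sortedItems child)
          0 (ind ++ "    ") (lines ++ [ind ++ "└── " ++ name])
        simp only [Nat.zero_add] at hrec
        rw [hrec]
        simp [goA, itemsRender]
    · have hlen : 0 < rest.length := List.length_pos_of_ne_nil hr
      simp only [List.length_cons, decide_eq_true_eq,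
        eq_false (show ¬ (i = i + (rest.length + 1) - 1) by omega),
        eq_false hr, if_false]
      have hn : i + (rest.length + 1) = (i + 1) + rest.length := by omega
      rw [hn]
      by_cases hc : child.isEmpty
      · rw [if_pos hc, if_pos hc, goA_eq_itemsRender rest (i+1) ind]
        simp
      · rw [if_neg hc, if_neg hc, walkA]
        have hrec := goA_eq_itemsRender (sortedItems child)
          0 (ind ++ "│   ") (lines ++ [ind ++ "├── " ++ name])
        simp only [Nat.zero_add] at hrec
        rw [hrec, goA_eq_itemsRender rest (i+1) ind]
        simp
termination_by msr items
decreasing_by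
  · have := msr_sortedItems child; rw [msr_cons]; omega
  · rw [msr_cons]; omega
  · have := msr_sortedItems child; rw [msr_cons]; omega
  · rw [msr_cons]; omega

theorem walkA_eq_itemsRender (t : Trie) (ind : String) :
    walkA t ind [] = itemsRender (sortedItems t) ind := by
  rw [walkA]
  simpa using goA_eq_itemsRender (sortedItems t) 0 ind []

-- ---- trie characterization ----
theorem trieOf_append_singleton (P : List (List String)) (q : List String) :
    trieOf (P ++ [q]) = insertParts (trieOf P) q := by
  simp [trieOf]

theorem keysOf_setdefaultGo : ∀ (l : TrieL) (p : String) (ps : List String),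
    keysOf (setdefaultGo l p ps) =
      if p ∈ keysOf l then keysOf l else keysOf l ++ [p]
  | .nil, p, ps => by simp [setdefaultGo, keysOf]
  | .cons k t r, p, ps => by
    by_cases hk : k = p
    · subst hk
      rw [setdefaultGo, if_pos rfl]
      simp [keysOf]
    · rw [setdefaultGo, if_neg hk]
      by_cases hp : p ∈ keysOf r
      · simp [keysOf, keysOf_setdefaultGo r p ps, hp, Ne.symm hk]
      · simp [keysOf, keysOf_setdefaultGo r p ps, hp, Ne.symm hk]

theorem findT_setdefaultGo : ∀ (l : TrieL) (p : String) (ps : List String) (q : String),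
    findT (setdefaultGo l p ps) q =
      if q = p then some (insertParts ((findT l p).getD (.node .nil)) ps) else findT l q
  | .nil, p, ps, q => by
    rw [setdefaultGo]
    by_cases hq : q = p <;> simp [findT, hq]
  | .cons k t r, p, ps, q => by
    by_cases hk : k = p
    · subst hk
      rw [setdefaultGo, if_pos rfl]
      by_cases hq : q = k
      · subst hq; simp [findT]
      · simp [findT, hq]
    · rw [setdefaultGo, if_neg hk]
      by_cases hq : q = k
      · subst hq
        simp [findT, hk]
      · simp [findT, hq, findT_setdefaultGo r p ps q, Ne.symm hk]

theorem findT_eq_none_iff : ∀ (l : TrieL) (k : String), findT l k = none ↔ k ∉ keysOf l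
  | .nil, k => by simp [findT, keysOf]
  | .cons k0 t r, k => by
    by_cases hq : k = k0 <;> simp [findT, keysOf, hq, findT_eq_none_iff r k]

theorem toItems_eq_map_keysOf : ∀ (l : TrieL), (keysOf l).Nodup →
    l.toItems = (keysOf l).map (fun k => (k, (findT l k).getD (.node .nil)))
  | .nil, _ => by simp [TrieL.toItems, keysOf]
  | .cons k t r, hnd => by
    rw [keysOf] at hnd
    rw [List.nodup_cons] at hnd
    rw [TrieL.toItems, keysOf, List.map_cons]
    congr 1
    · simp [findT]
    · rw [toItems_eq_map_keysOf r hnd.2]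
      apply List.map_congr_left
      intro k' hk'
      have : k' ≠ k := fun h => hnd.1 (h ▸ hk')
      simp [findT, this]

theorem keysOf_trieOf (P : List (List String)) : (∀ q ∈ P, q ≠ []) →
    keysOf (rootL (trieOf P)) = PySem.Set.ofList (heads P) := by
  induction P using List.reverseRecOn with
  | nil => intro _; simp [trieOf, rootL, keysOf, heads]
  | append_singleton P q ih =>
    intro hne
    have hq : q ≠ [] := hne q (by simp)
    obtain ⟨p, ps, rfl⟩ : ∃ p ps, q = p :: ps := by
      cases q with
      | nil => exact absurd rfl hq
      | cons a b => exact ⟨a, b, rfl⟩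
    have ihh := ih (fun x hx => hne x (by simp [hx]))
    rw [trieOf_append_singleton]
    cases htr : trieOf P with
    | node l =>
      rw [htr, rootL] at ihh
      rw [insertParts, rootL, keysOf_setdefaultGo, ihh]
      have hh : heads (P ++ [p :: ps]) = heads P ++ [p] := by simp [heads, hd]
      rw [hh, PySem.Set.ofList_append_singleton, PySem.Set.add_eq_ite]

theorem cp_append_singleton (P : List (List String)) (q : List String) (k : String) :
    cp (P ++ [q]) k = cp P k ++ cp [q] k := by
  simp [cp]

theorem findT_trieOf (P : List (List String)) : ∀ (k : String),
    (findT (rootL (trieOf P)) k).getD (.node .nil) = trieOf (cp P k) := by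
  induction P using List.reverseRecOn with
  | nil => intro k; simp [trieOf, rootL, findT, cp]
  | append_singleton P q ih =>
    intro k
    rw [trieOf_append_singleton, cp_append_singleton]
    cases htr : trieOf P with
    | node l =>
      have ihh : ∀ k', (findT l k').getD (.node .nil) = trieOf (cp P k') := by
        intro k'; have := ih k'; rwa [htr, rootL] at this
      cases q with
      | nil =>
        have h1 : insertParts (Trie.node l) [] = Trie.node l := by rw [insertParts]
        have h2 : cp [([] : List String)] k = [] := by simp [cp]
        rw [h1, rootL, h2, List.append_nil]
        exact ihh k
      | cons p ps =>
        rw [insertParts, rootL, findT_setdefaultGo]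
        by_cases hk : k = p
        · subst hk
          rw [if_pos rfl, Option.getD_some, ihh k]
          have : cp [k :: ps] k = [ps] := by simp [cp]
          rw [this, trieOf_append_singleton]
        · rw [if_neg hk, ihh k]
          have : cp [p :: ps] k = [] := by simp [cp, Ne.symm hk]
          rw [this, List.append_nil]

theorem foldl_insertParts_filter : ∀ (Q : List (List String)) (t : Trie),
    Q.foldl insertParts t = (Q.filter (fun q => !q.isEmpty)).foldl insertParts t
  | [], t => rfl
  | q :: Q, t => by
    cases q with
    | nil =>
      rw [List.foldl_cons]
      have h0 : insertParts t [] = t := by rw [insertParts]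
      rw [h0, List.filter_cons]
      simp only [List.isEmpty_nil, Bool.not_true, Bool.false_eq_true, if_false]
      exact foldl_insertParts_filter Q t
    | cons a b =>
      rw [List.foldl_cons, List.filter_cons]
      simp only [List.isEmpty_cons, Bool.not_false, if_true, List.foldl_cons]
      exact foldl_insertParts_filter Q (insertParts t (a :: b))

theorem trieOf_filter_ne_nil (Q : List (List String)) :
    trieOf Q = trieOf (Q.filter (fun q => !q.isEmpty)) :=
  foldl_insertParts_filter Q (.node .nil)

theorem isEmpty_iff_keysOf (t : Trie) : t.isEmpty = true ↔ keysOf (rootL t) = [] := by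
  cases t with
  | node l => cases l <;> simp [Trie.isEmpty, rootL, keysOf]

theorem trieOf_isEmpty_iff (P : List (List String)) (hne : ∀ q ∈ P, q ≠ []) :
    (trieOf P).isEmpty = true ↔ P = [] := by
  rw [isEmpty_iff_keysOf, keysOf_trieOf P hne]
  constructor
  · intro h
    cases P with
    | nil => rfl
    | cons q Q =>
      exfalso
      have : hd q ∈ PySem.Set.ofList (heads (q :: Q)) := by
        rw [PySem.Set.mem_ofList]; simp [heads]
      rw [h] at this
      simp at this
  · intro h; subst h; simp [heads]

theorem sortedItems_trieOf (P : List (List String)) (hne : ∀ q ∈ P, q ≠ []) :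
    sortedItems (trieOf P) =
      (SK (heads P)).map (fun k => (k, trieOf (cp P k))) := by
  cases htr : trieOf P with
  | node l =>
    have hk : keysOf l = PySem.Set.ofList (heads P) := by
      have := keysOf_trieOf P hne; rwa [htr, rootL] at this
    have hnd : (keysOf l).Nodup := by rw [hk]; exact PySem.Set.nodup_ofList _
    have hf : ∀ k', (findT l k').getD (.node .nil) = trieOf (cp P k') := by
      intro k'; have := findT_trieOf P k'; rwa [htr, rootL] at this
    have hitems : l.toItems = (keysOf l).map (fun k => (k, trieOf (cp P k))) := by
      rw [toItems_eq_map_keysOf l hnd]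
      exact List.map_congr_left (fun k _ => by rw [hf k])
    rw [sortedItems]
    apply PySem.List.sorted_eq_of_perm_of_pairwise_lt
    · rw [hitems, hk]
      exact ((PySem.List.sorted_perm (PySem.Set.ofList (heads P)) (fun x => x) false).map _)
    · have hp : (SK (heads P)).Pairwise (· < ·) :=
        PySem.List.sorted_ofList_pairwise_lt (heads P)
      exact (List.pairwise_map).mpr (hp.imp (fun h => h))

-- ---- lex-order facts on List String ----
theorem hd_le_of_lt {a b : List String} (ha : a ≠ []) (h : a < b) : hd a ≤ hd b := by
  cases a with
  | nil => exact absurd rfl ha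
  | cons x xs =>
    cases b with
    | nil => exact absurd h (List.not_lt_nil _)
    | cons y ys =>
      rcases List.cons_lt_cons_iff.mp h with h1 | ⟨h1, _⟩
      · exact le_of_lt h1
      · exact le_of_eq h1

theorem hd_le_of_le {a b : List String} (ha : a ≠ []) (h : a ≤ b) : hd a ≤ hd b := by
  rcases lt_or_eq_of_le h with h1 | h1
  · exact hd_le_of_lt ha h1
  · rw [h1]

theorem cons_lt_cons_same (x : String) {t t' : List String} :
    x :: t < x :: t' ↔ t < t' := by
  rw [List.cons_lt_cons_iff]
  simp

theorem nodup_of_pairwise_lt {α : Type} [Preorder α] {S : List α} (h : S.Pairwise (· < ·)) : S.Nodup :=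
  h.imp (fun hab => ne_of_lt hab)

-- ---- takeWhile/dropWhile of a sorted run are the filters ----
theorem takeWhile_dropWhile_filter (k : String) : ∀ (S : List (List String)),
    S.Pairwise (fun a b => hd a ≤ hd b) → (∀ q ∈ S, k ≤ hd q) →
    S.takeWhile (fun q => q.headD "" == k) = S.filter (fun q => q.headD "" == k) ∧
    S.dropWhile (fun q => q.headD "" == k) = S.filter (fun q => !(q.headD "" == k))
  | [], _, _ => by simp
  | r :: rs, hp, hmin => by
    rw [List.pairwise_cons] at hp
    by_cases hr : (r.headD "" == k) = true
    · obtain ⟨ih1, ih2⟩ := takeWhile_dropWhile_filter k rs hp.2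
        (fun q hq => hmin q (List.mem_cons_of_mem _ hq))
      refine ⟨?_, ?_⟩
      · rw [List.takeWhile_cons_of_pos (p := fun (q : List String) => q.headD "" == k) hr, List.filter_cons]
        simp only [hr, if_true, reduceIte]
        rw [ih1]
      · rw [List.dropWhile_cons_of_pos (p := fun (q : List String) => q.headD "" == k) hr, List.filter_cons]
        simp only [hr, Bool.not_true, Bool.false_eq_true, if_false, reduceIte]
        rw [ih2]
    · have hrr : r.headD "" ≠ k := by simpa using hr
      have hkr : k < r.headD "" :=
        lt_of_le_of_ne (hmin r (by simp)) (fun h => hrr h.symm)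
      have hall : ∀ q ∈ r :: rs, (q.headD "" == k) = false := by
        intro q hq
        rcases List.mem_cons.mp hq with rfl | hq2
        · simpa using hrr
        · have h1 : hd r ≤ hd q := hp.1 q hq2
          have h2 : k < q.headD "" := lt_of_lt_of_le hkr h1
          simpa using (ne_of_gt h2)
      refine ⟨?_, ?_⟩
      · rw [List.takeWhile_cons_of_neg (p := fun (q : List String) => q.headD "" == k) hr, eq_comm, List.filter_eq_nil_iff]
        intro a ha; simpa using hall a ha
      · rw [List.dropWhile_cons_of_neg (p := fun (q : List String) => q.headD "" == k) hr, eq_comm, List.filter_eq_self]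
        intro q hq; simpa using hall q hq

-- ---- small facts about SD/SK/cp and sums ----
theorem mem_SD (Q : List (List String)) (x : List String) : x ∈ SD Q ↔ x ∈ Q := by
  rw [SD, PySem.List.mem_sorted, PySem.Set.mem_ofList]

theorem mem_SK (H : List String) (x : String) : x ∈ SK H ↔ x ∈ H := by
  rw [SK, PySem.List.mem_sorted, PySem.Set.mem_ofList]

-- the ports elaborate sorted with core's List.instLT/decidableLT; the PySem order lemmas
-- with the LinearOrder-derived instances: the Decidable instances agree by subsingletonness
theorem decLT_subsingleton {κ : Type} {i : LT κ} (d1 d2 : @DecidableLT κ i) : d1 = d2 :=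
  funext fun _ => funext fun _ => Subsingleton.elim _ _

theorem SD_eq_lin (Q : List (List String)) :
    SD Q = @PySem.List.sorted (List String) (List String) List.instLT
      (@LinearOrder.toDecidableLT (List String) _) (PySem.Set.ofList Q) (fun x => x) false := by
  rw [SD, show (fun (a b : List String) => a.decidableLT b)
    = @LinearOrder.toDecidableLT (List String) _ from decLT_subsingleton _ _]

theorem SD_pairwise (Q : List (List String)) : (SD Q).Pairwise (· < ·) := by
  rw [SD_eq_lin]
  exact PySem.List.sorted_ofList_pairwise_lt Q

theorem SD_head_min {Q : List (List String)} {m : List String} {t : List (List String)}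
    (h : SD Q = m :: t) : ∀ y ∈ PySem.Set.ofList Q, m ≤ y := by
  rw [SD_eq_lin] at h
  exact PySem.List.key_head_sorted_le _ _ h

theorem SD_eq_of_perm_of_pairwise {Q ys : List (List String)}
    (hp : ys.Perm (PySem.Set.ofList Q)) (hlt : ys.Pairwise (· < ·)) : SD Q = ys := by
  rw [SD_eq_lin]
  exact PySem.List.sorted_eq_of_perm_of_pairwise_lt _ _ _ hp hlt

theorem SD_eq_nil_iff (Q : List (List String)) : SD Q = [] ↔ Q = [] := by
  rw [SD, PySem.List.sorted_eq_nil_iff]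
  constructor
  · intro h
    rw [List.eq_nil_iff_forall_not_mem]
    intro x hx
    have hm : x ∈ PySem.Set.ofList Q := by rw [PySem.Set.mem_ofList]; exact hx
    rw [h] at hm
    simp at hm
  · intro h; subst h; rfl

theorem SK_eq_nil_iff (H : List String) : SK H = [] ↔ H = [] := by
  rw [SK, PySem.List.sorted_eq_nil_iff]
  constructor
  · intro h
    rw [List.eq_nil_iff_forall_not_mem]
    intro x hx
    have hm : x ∈ PySem.Set.ofList H := by rw [PySem.Set.mem_ofList]; exact hx
    rw [h] at hm
    simp at hm
  · intro h; subst h; rfl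

theorem eq_cons_headD_tail {q : List String} (h : q ≠ []) : q = q.headD "" :: q.tail := by
  cases q with
  | nil => exact absurd rfl h
  | cons a t => rfl

theorem mem_cp (P : List (List String)) (k : String) (x : List String) :
    x ∈ cp P k ↔ k :: x ∈ P := by
  rw [cp, List.mem_filterMap]
  constructor
  · rintro ⟨q, hq, hm⟩
    cases q with
    | nil => simp at hm
    | cons a t =>
      simp at hm
      obtain ⟨rfl, rfl⟩ := hm
      exact hq
  · intro h
    exact ⟨k :: x, h, by simp⟩

theorem mem_childTails (l : List (List String)) (x : List String) :
    x ∈ childTails l ↔ ∃ q ∈ l, 1 < q.length ∧ q.tail = x := by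
  simp [childTails, List.mem_filterMap]

theorem cp_filter_ne (P : List (List String)) (k k₁ : String) (hkk : k ≠ k₁) :
    cp (P.filter (fun q => !(q.headD "" == k₁))) k = cp P k := by
  induction P with
  | nil => rfl
  | cons q Q ih =>
    rw [List.filter_cons]
    cases hq : (q.headD "" == k₁) with
    | true =>
      simp only [hq, Bool.not_true, Bool.false_eq_true, if_false, reduceIte]
      have hskip : cp (q :: Q) k = cp Q k := by
        cases q with
        | nil => simp [cp]
        | cons a t =>
          have ha : a = k₁ := by simpa using hq
          have hak : a ≠ k := fun h => hkk (h ▸ ha ▸ rfl)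
          simp [cp, hak]
      rw [ih, ← hskip]
    | false =>
      simp only [hq, Bool.not_false, if_true, reduceIte]
      cases q with
      | nil =>
        have h1 : ∀ (R : List (List String)), cp ([] :: R) k = cp R k := fun R => by simp [cp]
        rw [h1, h1, ih]
      | cons a t =>
        by_cases hak : a = k
        · have h2 : ∀ (R : List (List String)), cp ((a :: t) :: R) k = t :: cp R k :=
            fun R => by simp [cp, hak]
          rw [h2, h2, ih]
        · have h3 : ∀ (R : List (List String)), cp ((a :: t) :: R) k = cp R k :=
            fun R => by simp [cp, hak]
          rw [h3, h3, ih]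

theorem filter_sum_le (l : List (List String)) (pr : List String → Bool) :
    ((l.filter pr).map List.length).sum ≤ (l.map List.length).sum :=
  ((l.filter_sublist (p := pr)).map List.length).sum_le_sum (fun a _ => Nat.zero_le a)

theorem cp_sum_le (P : List (List String)) (k : String) :
    ((cp P k).map List.length).sum + (cp P k).length ≤ (P.map List.length).sum := by
  induction P with
  | nil => simp [cp]
  | cons q Q ih =>
    cases q with
    | nil =>
      have : cp ([] :: Q) k = cp Q k := by simp [cp]
      rw [this]
      simp only [List.map_cons, List.sum_cons]
      omega
    | cons a t =>
      by_cases hak : a = k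
      · have : cp ((a :: t) :: Q) k = t :: cp Q k := by simp [cp, hak]
        rw [this]
        simp only [List.map_cons, List.sum_cons, List.length_cons]
        omega
      · have : cp ((a :: t) :: Q) k = cp Q k := by simp [cp, hak]
        rw [this]
        simp only [List.map_cons, List.sum_cons]
        omega

theorem sum_filter_lt (pr : List String → Bool) {q0 : List String} :
    ∀ (P : List (List String)), q0 ∈ P → pr q0 = false → 0 < q0.length →
    ((P.filter pr).map List.length).sum < (P.map List.length).sum := by
  intro P
  induction P with
  | nil => intro h; simp at h
  | cons q Q ih =>
    intro hq0 hpr hlen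
    rw [List.filter_cons]
    rcases List.mem_cons.mp hq0 with rfl | hmem
    · rw [hpr]
      simp only [Bool.false_eq_true, if_false, reduceIte, List.map_cons, List.sum_cons]
      have := filter_sum_le Q pr
      omega
    · cases hq : pr q with
      | true =>
        simp only [if_true, reduceIte, List.map_cons, List.sum_cons]
        have := ih hmem hpr hlen
        omega
      | false =>
        simp only [Bool.false_eq_true, if_false, reduceIte, List.map_cons, List.sum_cons]
        have := ih hmem hpr hlen
        omega

-- ---- the main correspondence ----
theorem main_correspondence (P : List (List String)) (hne : ∀ q ∈ P, q ≠ []) (ind : String) :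
    itemsRender (sortedItems (trieOf P)) ind = renderB (SD P) ind := by
  by_cases hP : P = []
  · subst hP
    have h1 : trieOf ([] : List (List String)) = .node .nil := rfl
    have h2 : SD ([] : List (List String)) = [] := by rw [SD_eq_nil_iff]
    have h3 : sortedItems (Trie.node .nil) = [] := by
      rw [sortedItems, PySem.List.sorted_eq_nil_iff]; rfl
    rw [h1, h2, h3, itemsRender, renderB]
  · -- P ≠ []
    have hSp : (SD P).Pairwise (· < ·) := SD_pairwise P
    have hKp : (SK (heads P)).Pairwise (· < ·) := PySem.List.sorted_ofList_pairwise_lt (heads P)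
    have hK_ne : SK (heads P) ≠ [] := by
      rw [Ne, SK_eq_nil_iff, heads, List.map_eq_nil_iff]; exact hP
    have hS_ne : SD P ≠ [] := by rw [Ne, SD_eq_nil_iff]; exact hP
    obtain ⟨k₁, K', hK⟩ := List.exists_cons_of_ne_nil hK_ne
    obtain ⟨s₁, S', hS⟩ := List.exists_cons_of_ne_nil hS_ne
    have hK0 : PySem.List.sorted (PySem.Set.ofList (heads P)) (fun x => x) false = k₁ :: K' := by
      rw [← SK]; exact hK
    have hkmin : ∀ q ∈ P, k₁ ≤ hd q := by
      intro q hq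
      exact PySem.List.key_head_sorted_le _ _ hK0 (hd q)
        (by rw [PySem.Set.mem_ofList]; exact List.mem_map_of_mem hq)
    have hs₁P : s₁ ∈ P := by
      have : s₁ ∈ SD P := by rw [hS]; exact List.mem_cons_self
      exact (mem_SD P s₁).mp this
    have hs₁min : ∀ q ∈ P, s₁ ≤ q := by
      intro q hq
      exact SD_head_min hS q (by rw [PySem.Set.mem_ofList]; exact hq)
    have hs₁ne : s₁ ≠ [] := hne s₁ hs₁P
    have hk₁heads : k₁ ∈ heads P := by
      have : k₁ ∈ SK (heads P) := by rw [hK]; exact List.mem_cons_self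
      exact (mem_SK _ _).mp this
    have hhd : s₁.headD "" = k₁ := by
      apply le_antisymm
      · obtain ⟨q, hq, hqk⟩ := List.mem_map.mp hk₁heads
        have h1 : s₁ ≤ q := hs₁min q hq
        have h2 := hd_le_of_le hs₁ne h1
        rw [hqk] at h2
        exact h2
      · exact hkmin s₁ hs₁P
    -- the sorted items of the trie, head group split off
    have hA : sortedItems (trieOf P) =
        (k₁, trieOf (cp P k₁)) :: K'.map (fun k => (k, trieOf (cp P k))) := by
      rw [sortedItems_trieOf P hne, hK, List.map_cons]
    -- takeWhile/dropWhile on SD P are the filters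
    have hW := takeWhile_dropWhile_filter k₁ (SD P)
      (hSp.imp_of_mem (fun {a b} ha _ hlt => hd_le_of_lt (hne a ((mem_SD P a).mp ha)) hlt))
      (fun q hq => hkmin q ((mem_SD P q).mp hq))
    -- names for the two filters
    have hGmem : ∀ x, x ∈ (SD P).filter (fun q => (q.headD "" == k₁)) ↔ x ∈ P ∧ x.headD "" = k₁ := by
      intro x
      rw [List.mem_filter, mem_SD]
      simp
    have hEmem : ∀ x, x ∈ (SD P).filter (fun q => !(q.headD "" == k₁)) ↔ x ∈ P ∧ x.headD "" ≠ k₁ := by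
      intro x
      rw [List.mem_filter, mem_SD]
      simp
    -- children of the first group are the sorted distinct nonempty tails
    have hch : SD ((cp P k₁).filter (fun q => !q.isEmpty)) =
        childTails ((SD P).filter (fun q => (q.headD "" == k₁))) := by
      have hctp : (childTails ((SD P).filter (fun q => (q.headD "" == k₁)))).Pairwise (· < ·) := by
        rw [childTails, List.pairwise_filterMap]
        apply (hSp.filter _).imp_of_mem
        intro a b ha hb hab x hx y hy
        have ha2 := (hGmem a).mp ha
        have hb2 := (hGmem b).mp hb
        have hane : a ≠ [] := hne a ha2.1
        have hbne : b ≠ [] := hne b hb2.1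
        have hax : a.tail = x := by
          by_cases h1 : 1 < a.length
          · rw [if_pos h1] at hx; exact (Option.some_inj.mp hx)
          · rw [if_neg h1] at hx; cases hx
        have hby : b.tail = y := by
          by_cases h1 : 1 < b.length
          · rw [if_pos h1] at hy; exact (Option.some_inj.mp hy)
          · rw [if_neg h1] at hy; cases hy
        have hae : a = k₁ :: x := by
          rw [← hax, ← ha2.2]; exact eq_cons_headD_tail hane
        have hbe : b = k₁ :: y := by
          rw [← hby, ← hb2.2]; exact eq_cons_headD_tail hbne
        rw [hae, hbe] at hab
        exact (cons_lt_cons_same k₁).mp hab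
      apply SD_eq_of_perm_of_pairwise _ hctp
      have hnd1 : (childTails ((SD P).filter (fun q => (q.headD "" == k₁)))).Nodup :=
        nodup_of_pairwise_lt hctp
      have hnd2 : (PySem.Set.ofList ((cp P k₁).filter (fun q => !q.isEmpty))).Nodup :=
        PySem.Set.nodup_ofList _
      rw [List.perm_ext_iff_of_nodup hnd1 hnd2]
      intro x
      rw [mem_childTails, PySem.Set.mem_ofList, List.mem_filter]
      constructor
      · rintro ⟨q, hq, hql, hqt⟩
        have hq2 := (hGmem q).mp hq
        have hqne : q ≠ [] := hne q hq2.1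
        have hqe : q = k₁ :: x := by
          rw [← hqt, ← hq2.2]; exact eq_cons_headD_tail hqne
        constructor
        · rw [mem_cp]; rw [hqe] at hq2; exact hq2.1
        · rw [hqe] at hql
          simp at hql
          have hxne : x ≠ [] := List.ne_nil_of_length_pos hql
          simpa [List.isEmpty_iff] using hxne
      · rintro ⟨hx1, hx2⟩
        rw [mem_cp] at hx1
        refine ⟨k₁ :: x, (hGmem _).mpr ⟨hx1, by simp⟩, ?_, rfl⟩
        have hxne : x ≠ [] := by simpa [List.isEmpty_iff] using hx2
        have := List.length_pos_of_ne_nil hxne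
        simp
        omega
    -- rest of the groups: the filtered-out paths
    have hne₂ : ∀ q ∈ P.filter (fun q => !(q.headD "" == k₁)), q ≠ [] :=
      fun q hq => hne q (List.mem_of_mem_filter hq)
    have hheads₂ : ∀ x, x ∈ heads (P.filter (fun q => !(q.headD "" == k₁))) ↔
        x ∈ heads P ∧ x ≠ k₁ := by
      intro x
      rw [heads, List.mem_map]
      constructor
      · rintro ⟨q, hq, rfl⟩
        rw [List.mem_filter] at hq
        exact ⟨List.mem_map_of_mem hq.1, by simpa [hd] using hq.2⟩
      · rintro ⟨hx1, hx2⟩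
        obtain ⟨q, hq, rfl⟩ := List.mem_map.mp hx1
        exact ⟨q, List.mem_filter.mpr ⟨hq, by simpa [hd] using hx2⟩, rfl⟩
    have hKnd : (k₁ :: K').Nodup := by
      rw [← hK]; exact nodup_of_pairwise_lt hKp
    have hK' : SK (heads (P.filter (fun q => !(q.headD "" == k₁)))) = K' := by
      rw [SK]
      apply PySem.List.sorted_eq_of_perm_of_pairwise_lt
      · have hnd1 : K'.Nodup := (List.nodup_cons.mp hKnd).2
        have hnd2 : (PySem.Set.ofList (heads (P.filter (fun q => !(q.headD "" == k₁))))).Nodup :=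
          PySem.Set.nodup_ofList _
        rw [List.perm_ext_iff_of_nodup hnd1 hnd2]
        intro x
        rw [PySem.Set.mem_ofList, hheads₂]
        constructor
        · intro hx
          have hxk : x ∈ SK (heads P) := by rw [hK]; exact List.mem_cons_of_mem _ hx
          have hxne : x ≠ k₁ := fun h => (List.nodup_cons.mp hKnd).1 (h ▸ hx)
          exact ⟨(mem_SK _ _).mp hxk, hxne⟩
        · rintro ⟨hx1, hx2⟩
          have : x ∈ SK (heads P) := (mem_SK _ _).mpr hx1
          rw [hK] at this
          rcases List.mem_cons.mp this with rfl | h2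
          · exact absurd rfl hx2
          · exact h2
      · have := hK ▸ hKp
        exact (List.pairwise_cons.mp this).2
    have hcp₂ : ∀ k ∈ K', cp (P.filter (fun q => !(q.headD "" == k₁))) k = cp P k := by
      intro k hk
      have hkne : k ≠ k₁ := fun h => (List.nodup_cons.mp hKnd).1 (h ▸ hk)
      exact cp_filter_ne P k k₁ hkne
    -- strict decrease facts for the two recursive calls
    obtain ⟨q0, hq0P, hq0k⟩ := List.mem_map.mp hk₁heads
    have hq0ne : q0 ≠ [] := hne q0 hq0P
    have hq0e : q0 = k₁ :: q0.tail := by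
      rw [← hq0k]; exact eq_cons_headD_tail hq0ne
    have hcpne : q0.tail ∈ cp P k₁ := by rw [mem_cp, ← hq0e]; exact hq0P
    have hdec1 : (((cp P k₁).filter (fun q => !q.isEmpty)).map List.length).sum
        < (P.map List.length).sum := by
      have h1 := filter_sum_le (cp P k₁) (fun q => !q.isEmpty)
      have h2 := cp_sum_le P k₁
      have h3 : 0 < (cp P k₁).length := List.length_pos_of_mem hcpne
      omega
    have hdec2 : ((P.filter (fun q => !(q.headD "" == k₁))).map List.length).sum
        < (P.map List.length).sum := by
      apply sum_filter_lt _ _ hq0P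
      · simp [hd] at hq0k; simp [hq0k]
      · exact List.length_pos_of_ne_nil hq0ne
    -- the rest renders equally
    have hrest : itemsRender (K'.map (fun k => (k, trieOf (cp P k)))) ind
        = renderB ((SD P).filter (fun q => !(q.headD "" == k₁))) ind := by
      have h1 : K'.map (fun k => (k, trieOf (cp P k)))
          = sortedItems (trieOf (P.filter (fun q => !(q.headD "" == k₁)))) := by
        rw [sortedItems_trieOf _ hne₂, hK']
        exact (List.map_congr_left (fun k hk => by rw [hcp₂ k hk])).symm
      have hE : SD (P.filter (fun q => !(q.headD "" == k₁)))
          = (SD P).filter (fun q => !(q.headD "" == k₁)) := by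
        apply SD_eq_of_perm_of_pairwise
        · have hnd1 : ((SD P).filter (fun q => !(q.headD "" == k₁))).Nodup :=
            nodup_of_pairwise_lt (hSp.filter _)
          have hnd2 := PySem.Set.nodup_ofList (P.filter (fun q => !(q.headD "" == k₁)))
          rw [List.perm_ext_iff_of_nodup hnd1 hnd2]
          intro x
          rw [PySem.Set.mem_ofList, hEmem, List.mem_filter]
          simp
        · exact hSp.filter _
      rw [h1, main_correspondence _ hne₂ ind, hE]
    -- the child renders equally
    have hchild : ∀ ind', (if (trieOf (cp P k₁)).isEmpty = true then []
          else itemsRender (sortedItems (trieOf (cp P k₁))) ind')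
        = renderB (childTails ((SD P).filter (fun q => (q.headD "" == k₁)))) ind' := by
      intro ind'
      rw [← hch, trieOf_filter_ne_nil (cp P k₁)]
      have hneCPne : ∀ q ∈ (cp P k₁).filter (fun q => !q.isEmpty), q ≠ [] := by
        intro q hq
        have := (List.mem_filter.mp hq).2
        simpa [List.isEmpty_iff] using this
      by_cases hnc : (cp P k₁).filter (fun q => !q.isEmpty) = []
      · rw [hnc]
        have h1 : (trieOf ([] : List (List String))).isEmpty = true := rfl
        rw [if_pos h1]
        have h2 : SD ([] : List (List String)) = [] := by rw [SD_eq_nil_iff]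
        rw [h2, renderB]
      · have hemp : ¬ ((trieOf ((cp P k₁).filter (fun q => !q.isEmpty))).isEmpty = true) := by
          rw [trieOf_isEmpty_iff _ hneCPne]; exact hnc
        rw [if_neg hemp, main_correspondence _ hneCPne ind']
    -- isLast on both sides agree
    have hlast : (K' = []) ↔ (((SD P).filter (fun q => !(q.headD "" == k₁))).isEmpty = true) := by
      rw [List.isEmpty_iff, List.filter_eq_nil_iff]
      constructor
      · intro h
        intro q hq
        have hqP := (mem_SD P q).mp hq
        have : hd q ∈ heads P := List.mem_map_of_mem hqP
        have : hd q ∈ SK (heads P) := (mem_SK _ _).mpr this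
        rw [hK, h] at this
        simp at this
        simp [hd] at this
        simp [this]
      · intro h
        have h2 : SK (heads (P.filter (fun q => !(q.headD "" == k₁)))) = [] := by
          rw [SK_eq_nil_iff, heads, List.map_eq_nil_iff, List.filter_eq_nil_iff]
          intro q hq
          have hq2 : q ∈ SD P := (mem_SD P q).mpr hq
          have := h q hq2
          simpa using this
        rw [hK'] at h2
        exact h2
    -- assemble
    rw [hA, itemsRender, hS, renderB]
    simp only [hhd, ← hS, hW.1, hW.2]
    by_cases hl : K' = []
    · have hel := hlast.mp hl
      rw [hl]
      simp only [List.map_nil, hel, if_true, reduceIte]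
      rw [hchild _, itemsRender]
      have hE0 : (SD P).filter (fun q => !(q.headD "" == k₁)) = [] := List.isEmpty_iff.mp hel
      rw [hE0, renderB]
    · have hel : ¬ (((SD P).filter (fun q => !(q.headD "" == k₁))).isEmpty = true) :=
        fun h => hl (hlast.mpr h)
      have hmne : K'.map (fun k => (k, trieOf (cp P k))) ≠ [] := by
        rw [Ne, List.map_eq_nil_iff]; exact hl
      rw [if_neg hmne, if_neg hmne, if_neg hel, if_neg hel, hchild _, hrest]
termination_by (P.map List.length).sum
decreasing_by
  · exact hdec2
  · exact hdec1

-- ===== VERDICT (by name: the statement is the Claim_ definition above) =====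
theorem get_tree_structure_spec : Claim_equal_get_tree_structure := by
  intro file_list _
  unfold Spec_get_tree_structure get_tree_structure get_tree_structure_alt
  by_cases hfl : file_list = []
  · rw [if_pos hfl, if_pos hfl]
  · rw [if_neg hfl, if_neg hfl]
    have hb : buildTree file_list = trieOf (file_list.map pySplitSlash) := by
      simp [buildTree, trieOf, List.foldl_map]
    have hne : ∀ q ∈ file_list.map pySplitSlash, q ≠ [] := by
      intro q hq
      obtain ⟨s, _, rfl⟩ := List.mem_map.mp hq
      exact pySplitSlash_ne_nil s
    rw [hb, walkA_eq_itemsRender, main_correspondence _ hne]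
    rfl
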